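-- pv_equiv track=rewrite | github.com/ondracek-lukas/geometric-figures | src/binFiles/modules/figureInfo.py | countsToStr
-- ===== SOURCE A (Python) =====
-- def countsToStr(cnts):
-- 	dim=len(cnts)-1
-- 	if dim==0:
-- 		return "free vertex"
-- 	else:
-- 		text=str(dim) + "D figure ("
-- 		if dim>4:
-- 			for i in range(dim-1, 3, -1):
-- 				text+= str(cnts[i]) + " " + str(i) + "-faces, "
-- 		if dim>3:
-- 			text+= str(cnts[3]) + " cells, "
-- 		if dim>2:
-- 			text+= str(cnts[2]) + " faces, "
-- 		if dim>1:
-- 			text+= str(cnts[1]) + " edges, "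
-- 		text+= str(cnts[0]) + " vertices)"
-- 		return text;
-- ===== SOURCE B (Python) =====
-- def countsToStr(cnts):
--     dim = len(cnts) - 1
--     if dim == 0:
--         return "free vertex"
--     labels = {1: "edges", 2: "faces", 3: "cells"}
--     parts = [str(cnts[i]) + " " + labels.get(i, str(i) + "-faces")
--              for i in range(dim - 1, 0, -1)]
--     parts.append(str(cnts[0]) + " vertices")
--     return str(dim) + "D figure (" + ", ".join(parts) + ")"
-- ===== Notes on version B (the rewrite author's own statement) =====
-- stated objective: simpler
-- what changed: Replaces A's string-accumulator branch cascade (dim>4 loop plus three guarded appends) by one uniform descending pass that builds a list of '<count> <label>' parts via a label table and joins them with ', '.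
import Mathlib
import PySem

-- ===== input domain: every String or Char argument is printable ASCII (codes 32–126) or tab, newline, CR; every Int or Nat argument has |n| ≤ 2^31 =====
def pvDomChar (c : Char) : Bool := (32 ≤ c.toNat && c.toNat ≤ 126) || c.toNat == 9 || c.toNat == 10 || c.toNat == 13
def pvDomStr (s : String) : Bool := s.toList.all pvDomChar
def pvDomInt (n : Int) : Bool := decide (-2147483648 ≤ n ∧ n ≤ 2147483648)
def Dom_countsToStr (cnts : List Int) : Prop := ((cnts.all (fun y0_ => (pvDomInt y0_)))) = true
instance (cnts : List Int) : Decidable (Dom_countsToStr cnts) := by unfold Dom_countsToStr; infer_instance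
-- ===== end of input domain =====

-- B replaces A's branch cascade by one descending pass over a label table joined with ", " (objective: simpler).
-- ===== PORT A =====
def countsToStr (cnts : List Int) : String :=
  let dim : Int := (cnts.length : Int) - 1
  if dim = 0 then "free vertex"
  else
    let text := PySem.Int.toStr dim ++ "D figure ("
    let text := if dim > 4 then
        (PySem.List.pyRange (dim - 1) 3 (-1)).foldl
          (fun t i => t ++ PySem.Int.toStr (PySem.List.pyGetD cnts i 0) ++ " " ++ PySem.Int.toStr i ++ "-faces, ") text
      else text
    let text := if dim > 3 then text ++ PySem.Int.toStr (PySem.List.pyGetD cnts 3 0) ++ " cells, " else text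
    let text := if dim > 2 then text ++ PySem.Int.toStr (PySem.List.pyGetD cnts 2 0) ++ " faces, " else text
    let text := if dim > 1 then text ++ PySem.Int.toStr (PySem.List.pyGetD cnts 1 0) ++ " edges, " else text
    text ++ PySem.Int.toStr (PySem.List.pyGetD cnts 0 0) ++ " vertices)"

-- ===== PORT B =====
-- labels.get(i, str(i) + "-faces") from Source B
def pvLabel (i : Int) : String :=
  (PySem.Dict.ofList [((1 : Int), "edges"), (2, "faces"), (3, "cells")]).getD i
    (PySem.Int.toStr i ++ "-faces")

def countsToStr_alt (cnts : List Int) : String :=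
  let dim : Int := (cnts.length : Int) - 1
  if dim = 0 then "free vertex"
  else
    let parts := (PySem.List.pyRange (dim - 1) 0 (-1)).map
      (fun i => PySem.Int.toStr (PySem.List.pyGetD cnts i 0) ++ " " ++ pvLabel i)
    let parts := parts ++ [PySem.Int.toStr (PySem.List.pyGetD cnts 0 0) ++ " vertices"]
    PySem.Int.toStr dim ++ "D figure (" ++ PySem.Str.join ", " parts ++ ")"

-- ===== PRECONDITION & SPEC =====
-- Pre_ excludes only the empty list, on which the Python A (and B) raises IndexError when indexing the first count.
def Pre_countsToStr (cnts : List Int) : Prop := cnts ≠ []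
instance (cnts : List Int) : Decidable (Pre_countsToStr cnts) := by unfold Pre_countsToStr; infer_instance
def pvWitness_countsToStr : List Int := [4, 6, 4]

def Spec_countsToStr (cnts : List Int) (out : String) : Prop := out = countsToStr_alt cnts
instance (cnts : List Int) (out : String) : Decidable (Spec_countsToStr cnts out) := by unfold Spec_countsToStr; infer_instance

-- ===== CLAIM (what is proved, stated in full; the proofs are below) =====
def Claim_equal_countsToStr : Prop := ∀ (cnts : List Int), Dom_countsToStr cnts → Pre_countsToStr cnts → Spec_countsToStr cnts (countsToStr cnts)

-- ===== LEMMAS AND PROOFS =====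

theorem pv_str_ext {s t : String} (h : s.toList = t.toList) : s = t := by
  have := congrArg String.ofList h; simpa using this

theorem pv_join_cons (sep p : String) (ps : List String) (h : ps ≠ []) :
    PySem.Str.join sep (p :: ps) = p ++ sep ++ PySem.Str.join sep ps := by
  cases ps with
  | nil => exact absurd rfl h
  | cons q rest =>
    apply pv_str_ext
    simp [PySem.Str.toList_join, PySem.Chars.join_cons_cons]

theorem pv_join_singleton (sep v : String) : PySem.Str.join sep [v] = v := by
  apply pv_str_ext
  simp [PySem.Str.toList_join, PySem.Chars.join_singleton]

-- A's accumulator fold followed by the final part equals B's join of the parts.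
theorem pv_core (part : Int → String) (v : String) : ∀ (k : Nat) (t : String),
    ((PySem.List.pyRange (k : Int) 0 (-1)).foldl (fun t i => t ++ part i ++ ", ") t) ++ v
      = t ++ PySem.Str.join ", " ((PySem.List.pyRange (k : Int) 0 (-1)).map part ++ [v]) := by
  intro k
  induction k with
  | zero =>
    intro t
    rw [PySem.List.pyRange_neg_one_eq_nil (by norm_num)]
    simp [pv_join_singleton]
  | succ n ih =>
    intro t
    rw [PySem.List.pyRange_neg_one_cons (by exact_mod_cast Nat.succ_pos n)]
    have hn : ((n : Int) + 1) - 1 = (n : Int) := by ring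
    push_cast
    rw [hn]
    simp only [List.foldl_cons, List.map_cons, List.cons_append]
    rw [ih]
    rw [pv_join_cons ", " (part ((n : Int) + 1)) (List.map part (PySem.List.pyRange (n : Int) 0 (-1)) ++ [v]) (by simp)]
    simp [String.append_assoc]

theorem pvLabel_big (i : Int) (h : 4 ≤ i) : pvLabel i = PySem.Int.toStr i ++ "-faces" := by
  have h1 : i ≠ 1 := by omega
  have h2 : i ≠ 2 := by omega
  have h3 : i ≠ 3 := by omega
  simp [pvLabel, PySem.Dict.ofList, PySem.Dict.update, PySem.Dict.getD_insert, h1, h2, h3,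
    PySem.Dict.getD_empty]

theorem pvL1 : pvLabel 1 = "edges" := by decide
theorem pvL2 : pvLabel 2 = "faces" := by decide
theorem pvL3 : pvLabel 3 = "cells" := by decide
theorem pvS_e : (" edges, " : String) = " " ++ "edges" ++ ", " := by decide
theorem pvS_f : (" faces, " : String) = " " ++ "faces" ++ ", " := by decide
theorem pvS_c : (" cells, " : String) = " " ++ "cells" ++ ", " := by decide
theorem pvS_x : ("-faces, " : String) = "-faces" ++ ", " := by decide
theorem pvS_v : (" vertices)" : String) = " vertices" ++ ")" := by decide

def pvBody (cnts : List Int) (t : String) (i : Int) : String :=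
  t ++ (PySem.Int.toStr (PySem.List.pyGetD cnts i 0) ++ " " ++ pvLabel i) ++ ", "

theorem pv_split : ∀ (m : Nat),
    PySem.List.pyRange ((m : Int) + 3) 0 (-1)
      = PySem.List.pyRange ((m : Int) + 3) 3 (-1) ++ ([3, 2, 1] : List Int) := by
  intro m
  induction m with
  | zero => decide
  | succ n ih =>
    push_cast
    rw [PySem.List.pyRange_neg_one_cons (a := (n : Int) + 1 + 3) (by omega),
        PySem.List.pyRange_neg_one_cons (a := (n : Int) + 1 + 3) (by omega)]
    have h : ((n : Int) + 1 + 3) - 1 = (n : Int) + 3 := by ring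
    rw [h, ih]
    simp

theorem pv_guards (cnts : List Int) (d : Int) (hd : 1 ≤ d) (t : String) :
    (let t1 := if d > 4 then
        (PySem.List.pyRange (d - 1) 3 (-1)).foldl
          (fun t i => t ++ PySem.Int.toStr (PySem.List.pyGetD cnts i 0) ++ " " ++ PySem.Int.toStr i ++ "-faces, ") t
      else t;
     let t2 := if d > 3 then t1 ++ PySem.Int.toStr (PySem.List.pyGetD cnts 3 0) ++ " cells, " else t1;
     let t3 := if d > 2 then t2 ++ PySem.Int.toStr (PySem.List.pyGetD cnts 2 0) ++ " faces, " else t2;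
     if d > 1 then t3 ++ PySem.Int.toStr (PySem.List.pyGetD cnts 1 0) ++ " edges, " else t3)
    = (PySem.List.pyRange (d - 1) 0 (-1)).foldl (pvBody cnts) t := by
  by_cases h4 : d > 4
  · -- d ≥ 5: every guard fires; split the full countdown at 3
    have hm : ((d - 4).toNat : Int) + 3 = d - 1 := by omega
    have hsplit : PySem.List.pyRange (d - 1) 0 (-1)
        = PySem.List.pyRange (d - 1) 3 (-1) ++ ([3, 2, 1] : List Int) := by
      rw [← hm]; exact pv_split _
    have hcongr : (PySem.List.pyRange (d - 1) 3 (-1)).foldl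
        (fun t i => t ++ PySem.Int.toStr (PySem.List.pyGetD cnts i 0) ++ " " ++ PySem.Int.toStr i ++ "-faces, ") t
        = (PySem.List.pyRange (d - 1) 3 (-1)).foldl (pvBody cnts) t := by
      apply PySem.List.foldl_congr_mem
      intro acc x hx
      have hx' := PySem.List.mem_pyRange_neg_one.mp hx
      rw [pvBody, pvLabel_big x (by omega), pvS_x]
      simp [String.append_assoc]
    simp only [if_pos h4, if_pos (by omega : d > 3), if_pos (by omega : d > 2),
      if_pos (by omega : d > 1)]
    rw [hcongr, hsplit, List.foldl_append]
    simp [pvBody, pvL1, pvL2, pvL3, pvS_e, pvS_f, pvS_c, String.append_assoc]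
  · have hle : d ≤ 4 := by omega
    interval_cases d
    · have h : PySem.List.pyRange (0 : Int) 0 (-1) = [] := by decide
      simp [h]
    · have h : PySem.List.pyRange (1 : Int) 0 (-1) = [(1 : Int)] := by decide
      simp [h, pvBody, pvL1, pvS_e, String.append_assoc]
    · have h : PySem.List.pyRange (2 : Int) 0 (-1) = [(2 : Int), 1] := by decide
      simp [h, pvBody, pvL1, pvL2, pvS_e, pvS_f, String.append_assoc]
    · have h : PySem.List.pyRange (3 : Int) 0 (-1) = [(3 : Int), 2, 1] := by decide
      simp [h, pvBody, pvL1, pvL2, pvL3, pvS_e, pvS_f, pvS_c, String.append_assoc]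

-- ===== VERDICT (by name: the statement is the Claim_ definition above) =====
theorem countsToStr_spec : Claim_equal_countsToStr := by
  intro cnts _ hpre
  unfold Spec_countsToStr countsToStr countsToStr_alt
  have hlen : 1 ≤ cnts.length := List.length_pos_iff.mpr hpre
  by_cases hd0 : ((cnts.length : Int) - 1) = 0
  · simp only [hd0, reduceIte]
  · have hd : 1 ≤ (cnts.length : Int) - 1 := by omega
    simp only [if_neg hd0]
    rw [pv_guards cnts ((cnts.length : Int) - 1) hd]
    have hk : (((((cnts.length : Int) - 1) - 1).toNat : Int)) = ((cnts.length : Int) - 1) - 1 := by omega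
    have hcore := pv_core
      (fun i => PySem.Int.toStr (PySem.List.pyGetD cnts i 0) ++ " " ++ pvLabel i)
      (PySem.Int.toStr (PySem.List.pyGetD cnts 0 0) ++ " vertices")
      ((((cnts.length : Int) - 1) - 1).toNat)
      (PySem.Int.toStr ((cnts.length : Int) - 1) ++ "D figure (")
    rw [hk] at hcore
    have hbody : (PySem.List.pyRange (((cnts.length : Int) - 1) - 1) 0 (-1)).foldl (pvBody cnts)
          (PySem.Int.toStr ((cnts.length : Int) - 1) ++ "D figure (")
        = (PySem.List.pyRange (((cnts.length : Int) - 1) - 1) 0 (-1)).foldl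
          (fun t i => t ++ (PySem.Int.toStr (PySem.List.pyGetD cnts i 0) ++ " " ++ pvLabel i) ++ ", ")
          (PySem.Int.toStr ((cnts.length : Int) - 1) ++ "D figure (") := rfl
    rw [hbody]
    rw [pvS_v]
    simp only [← String.append_assoc] at hcore ⊢
    rw [← hcore]
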